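-- pv_equiv track=rewrite | github.com/DavidJHub/VoiceAnalyzerPlatformLab | segmentationModel/textPostprocessing.py | agrupar_consecutivos
-- ===== SOURCE A (Python) =====
-- def agrupar_consecutivos(conf_series):
--     """
--     Asigna un "group_id" positivo para cada fila que tenga conf_series>0
--     y sea consecutiva con la anterior.
--     0 => no pertenece a un grupo (conf=0)
--     1,2,3,... => ID del grupo consecutivo.
--     """
--     group_ids = []
--     current_group = 0
--     previous_nonzero = False
--
--     for val in conf_series:
--         if val > 0:
--             if not previous_nonzero:
--                 # Abrimos un nuevo grupo
--                 current_group += 1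
--             group_ids.append(current_group)
--             previous_nonzero = True
--         else:
--             # val=0 => no forma parte de un grupo
--             group_ids.append(0)
--             previous_nonzero = False
--
--     return group_ids
-- ===== SOURCE B (Python) =====
-- from itertools import groupby
--
-- def agrupar_consecutivos(conf_series):
--     group_ids = []
--     counter = 0
--     for positive, grp in groupby(conf_series, key=lambda v: v > 0):
--         n = len(list(grp))
--         if positive:
--             counter += 1
--             group_ids.extend([counter] * n)
--         else:
--             group_ids.extend([0] * n)
--     return group_ids
-- ===== Notes on version B (the rewrite author's own statement) =====
-- stated objective: idiomatic
-- what changed: Replaces the element-wise previous_nonzero state machine with a run-based traversal via itertools.groupby on the sign key, emitting each run in one extend.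
import Mathlib
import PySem

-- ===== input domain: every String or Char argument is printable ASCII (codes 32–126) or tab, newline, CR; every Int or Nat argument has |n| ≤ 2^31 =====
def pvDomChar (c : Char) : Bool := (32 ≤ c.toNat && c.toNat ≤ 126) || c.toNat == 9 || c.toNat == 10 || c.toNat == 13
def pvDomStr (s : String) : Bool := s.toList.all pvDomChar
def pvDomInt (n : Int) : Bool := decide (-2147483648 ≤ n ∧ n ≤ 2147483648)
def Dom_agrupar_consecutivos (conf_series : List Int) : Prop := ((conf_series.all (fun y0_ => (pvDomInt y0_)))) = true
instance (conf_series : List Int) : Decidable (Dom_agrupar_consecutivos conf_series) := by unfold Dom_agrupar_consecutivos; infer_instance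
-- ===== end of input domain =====

-- B replaces A's element-wise previous_nonzero state machine with a run-based
-- traversal (itertools.groupby over the sign key) — idiomatic, same cost.


-- ===== PORT A =====
-- A's for-loop with state (group_ids, current_group, previous_nonzero), appended element by element.
def agrupar_consecutivos_go : List Int → List Int → Int → Bool → List Int
  | [], group_ids, _, _ => group_ids
  | val :: rest, group_ids, current_group, previous_nonzero =>
    if 0 < val then
      let current_group' := if !previous_nonzero then current_group + 1 else current_group
      agrupar_consecutivos_go rest (group_ids ++ [current_group']) current_group' true
    else
      agrupar_consecutivos_go rest (group_ids ++ [0]) current_group false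

def agrupar_consecutivos (conf_series : List Int) : List Int :=
  agrupar_consecutivos_go conf_series [] 0 false

-- ===== PORT B =====
-- B's groupby loop: consume one maximal same-key run at a time, emit it in one piece.
def agrupar_consecutivos_alt_go : List Int → Int → List Int
  | [], _ => []
  | v :: rest, counter =>
    if 0 < v then
      let run := rest.takeWhile (fun x => 0 < x)
      let rest' := rest.dropWhile (fun x => 0 < x)
      (counter + 1) :: List.replicate run.length (counter + 1) ++ agrupar_consecutivos_alt_go rest' (counter + 1)
    else
      let run := rest.takeWhile (fun x => x ≤ 0)
      let rest' := rest.dropWhile (fun x => x ≤ 0)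
      0 :: List.replicate run.length 0 ++ agrupar_consecutivos_alt_go rest' counter
  termination_by xs _ => xs.length
  decreasing_by
    · exact Nat.lt_succ_of_le ((List.dropWhile_sublist _).length_le)
    · exact Nat.lt_succ_of_le ((List.dropWhile_sublist _).length_le)

def agrupar_consecutivos_alt (conf_series : List Int) : List Int :=
  agrupar_consecutivos_alt_go conf_series 0

-- ===== PRECONDITION & SPEC =====
def Spec_agrupar_consecutivos (conf_series : List Int) (out : List Int) : Prop := out = agrupar_consecutivos_alt conf_series
instance (conf_series : List Int) (out : List Int) : Decidable (Spec_agrupar_consecutivos conf_series out) := by unfold Spec_agrupar_consecutivos; infer_instance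

-- ===== CLAIM (what is proved, stated in full; the proofs are below) =====
def Claim_equal_agrupar_consecutivos : Prop := ∀ (conf_series : List Int), Dom_agrupar_consecutivos conf_series → Spec_agrupar_consecutivos conf_series (agrupar_consecutivos conf_series)

-- ===== LEMMAS AND PROOFS =====

-- Accumulator-free reading of A's loop body.
def fA : List Int → Int → Bool → List Int
  | [], _, _ => []
  | val :: rest, c, prev =>
    if 0 < val then
      let c' := if !prev then c + 1 else c
      c' :: fA rest c' true
    else
      0 :: fA rest c false

theorem agrupar_consecutivos_go_acc (xs : List Int) :
    ∀ (acc : List Int) (c : Int) (prev : Bool),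
      agrupar_consecutivos_go xs acc c prev = acc ++ fA xs c prev := by
  induction xs with
  | nil => intro acc c prev; simp [agrupar_consecutivos_go, fA]
  | cons v rest ih =>
    intro acc c prev
    by_cases h : 0 < v <;> simp [agrupar_consecutivos_go, fA, h, ih]

-- A non-positive run merges into the following call: altGo absorbs leading ≤ 0 elements as zeros.
theorem altGo_zeros (t : List Int) (c : Int) :
    agrupar_consecutivos_alt_go t c =
      List.replicate (t.takeWhile (fun x => x ≤ 0)).length 0 ++
        agrupar_consecutivos_alt_go (t.dropWhile (fun x => x ≤ 0)) c := by
  cases t with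
  | nil => simp
  | cons w t' =>
    by_cases h : 0 < w
    · have h' : ¬ w ≤ 0 := by omega
      simp [List.takeWhile, List.dropWhile, h']
    · have h' : w ≤ 0 := by omega
      rw [agrupar_consecutivos_alt_go]
      simp [List.takeWhile, List.dropWhile, List.replicate_succ, h, h']

theorem fA_eq_altGo (xs : List Int) : ∀ (c : Int),
    fA xs c false = agrupar_consecutivos_alt_go xs c ∧
    fA xs c true =
      List.replicate (xs.takeWhile (fun x => 0 < x)).length c ++
        agrupar_consecutivos_alt_go (xs.dropWhile (fun x => 0 < x)) c := by
  induction xs with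
  | nil =>
    intro c
    have h0 : agrupar_consecutivos_alt_go [] c = [] := by rw [agrupar_consecutivos_alt_go]
    simp [fA, h0]
  | cons v rest ih =>
    intro c
    by_cases h : 0 < v
    · constructor
      · rw [agrupar_consecutivos_alt_go]
        simp [fA, h, (ih (c + 1)).2]
      · simp [fA, h, List.takeWhile, List.dropWhile, List.replicate_succ, (ih c).2]
    · have h' : v ≤ 0 := by omega
      constructor
      · rw [agrupar_consecutivos_alt_go]
        simp [fA, h, (ih c).1, altGo_zeros rest c]
      · simp [fA, h, List.takeWhile, List.dropWhile, (ih c).1, altGo_zeros rest c]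
        rw [agrupar_consecutivos_alt_go]
        simp [h]

-- ===== VERDICT (by name: the statement is the Claim_ definition above) =====
theorem agrupar_consecutivos_spec : Claim_equal_agrupar_consecutivos := by
  intro xs _
  unfold Spec_agrupar_consecutivos agrupar_consecutivos agrupar_consecutivos_alt
  rw [agrupar_consecutivos_go_acc, (fA_eq_altGo xs 0).1]
  simp
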